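-- pv_equiv track=rewrite | github.com/MichaelFack/BachelorFlaskServer | app.py | acceptable_filename
-- ===== SOURCE A (Python) =====
-- import string
--
-- ALLOWED_EXTENSIONS = {'cio'}  # Our madeup fileext indicating that it has been encrypted; not to be confused with SWAT.
--
-- def acceptable_filename(filename):
--     if '.' not in filename: return False
--     filename_fragments = filename.rsplit('.', 1)
--     if filename_fragments[1].lower() not in ALLOWED_EXTENSIONS: return False
--     for char in filename_fragments[0]:
--         if char not in string.hexdigits:
--             return False
--     return True
-- ===== SOURCE B (Python) =====
-- import re
--
-- _PATTERN = re.compile(r'[0-9a-fA-F]*\.cio', re.IGNORECASE)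
--
-- def acceptable_filename(filename):
--     return _PATTERN.fullmatch(filename) is not None
-- ===== Notes on version B (the rewrite author's own statement) =====
-- stated objective: idiomatic
-- what changed: Replaces the manual dot-membership test, rsplit on the last dot, lowered-extension set lookup and explicit per-character hex loop with a single anchored regular expression fullmatch ([0-9a-fA-F]*\.cio, IGNORECASE).
import Mathlib
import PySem

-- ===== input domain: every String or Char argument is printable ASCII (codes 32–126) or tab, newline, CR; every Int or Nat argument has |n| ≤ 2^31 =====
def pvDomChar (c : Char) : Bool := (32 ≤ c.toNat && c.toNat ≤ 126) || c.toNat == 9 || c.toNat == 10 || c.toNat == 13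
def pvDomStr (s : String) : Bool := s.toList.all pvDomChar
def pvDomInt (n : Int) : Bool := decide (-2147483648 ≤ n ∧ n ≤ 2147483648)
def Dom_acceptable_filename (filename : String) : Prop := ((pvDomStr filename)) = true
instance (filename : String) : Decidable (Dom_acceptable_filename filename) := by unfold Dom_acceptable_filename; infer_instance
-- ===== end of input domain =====

-- B replaces A's dot-check / rsplit / extension-compare / per-character loop by one anchored
-- regular-expression fullmatch (ported by hand, exact): idiomatic, same cost.

-- ===== PORT A =====
-- string.hexdigits
def pvHexdigits : List Char := "0123456789abcdefABCDEF".toList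

-- hand port of filename.rsplit('.', 1): some (base, ext) = split at the LAST '.',
-- none when no '.' occurs (exact; A only reads the fragments after checking '.' is present).
def pvRsplitDot : List Char → Option (List Char × List Char)
  | [] => none
  | c :: rest =>
    match pvRsplitDot rest with
    | some (b, e) => some (c :: b, e)
    | none => if c == '.' then some ([], rest) else none

-- the 'for char in filename_fragments[0]' loop
def pvHexLoop : List Char → Bool
  | [] => true
  | c :: rest => if !(PySem.Chars.isIn [c] pvHexdigits) then false else pvHexLoop rest

def acceptable_filename (filename : String) : Bool :=
  let cs := filename.toList
  if !(PySem.Chars.isIn ['.'] cs) then false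
  else
    match pvRsplitDot cs with
    | none => false  -- unreachable: '.' is in cs here
    | some (base, ext) =>
      if !(PySem.Set.contains (PySem.Set.ofList ["cio".toList]) (PySem.Chars.lower ext)) then false
      else pvHexLoop base

-- ===== PORT B =====
-- the regex character class [0-9a-fA-F], as the set of characters it accepts
def pvHexClass (c : Char) : Bool := pvHexdigits.contains c

-- hand port of re.fullmatch(r'[0-9a-fA-F]*\.cio', filename, re.IGNORECASE) is not None; exact:
-- the class cannot match '.', so the greedy star is deterministic — the match succeeds iff the
-- longest hex-class prefix is followed by exactly '.cio' up to ASCII case.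
def acceptable_filename_alt (filename : String) : Bool :=
  PySem.Chars.lower (filename.toList.dropWhile pvHexClass) == ['.', 'c', 'i', 'o']

-- ===== PRECONDITION & SPEC =====
def Spec_acceptable_filename (filename : String) (out : Bool) : Prop := out = acceptable_filename_alt filename
instance (filename : String) (out : Bool) : Decidable (Spec_acceptable_filename filename out) := by unfold Spec_acceptable_filename; infer_instance

-- ===== CLAIM (what is proved, stated in full; the proofs are below) =====
def Claim_equal_acceptable_filename : Prop := ∀ (filename : String), Dom_acceptable_filename filename → Spec_acceptable_filename filename (acceptable_filename filename)

-- ===== LEMMAS AND PROOFS =====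

theorem pv_isIn_singleton (c : Char) (s : List Char) :
    PySem.Chars.isIn [c] s = s.contains c := by
  by_cases h : c ∈ s
  · have h1 : [c] <:+: s := by
      obtain ⟨l1, l2, rfl⟩ := List.append_of_mem h
      exact ⟨l1, l2, by simp⟩
    rw [(PySem.Chars.isIn_iff_infix [c] s).2 h1]
    simp [h]
  · have h1 : ¬ [c] <:+: s := fun hi => h (hi.subset (by simp))
    rw [(PySem.Chars.isIn_eq_false_iff [c] s).2 h1]
    simp [h]

theorem pv_hex_eq_class (c : Char) :
    PySem.Chars.isIn [c] pvHexdigits = pvHexClass c :=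
  pv_isIn_singleton c pvHexdigits

theorem pv_rsplit_none_iff (cs : List Char) : pvRsplitDot cs = none ↔ '.' ∉ cs := by
  induction cs with
  | nil => simp [pvRsplitDot]
  | cons c rest ih =>
    cases h : pvRsplitDot rest with
    | some p =>
      obtain ⟨b, e⟩ := p
      have hm : '.' ∈ rest := by
        by_contra hn
        rw [ih.2 hn] at h; cases h
      simp [pvRsplitDot, h, hm]
    | none =>
      have hrest : '.' ∉ rest := ih.1 h
      by_cases hc : c = '.'
      · simp [pvRsplitDot, h, hc]
      · have hc' : ¬ ('.' = c) := fun he => hc he.symm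
        simp [pvRsplitDot, h, hc, hc', hrest]

theorem pv_lowerChar_dot (c : Char) : (PySem.Chars.lowerChar c = '.') ↔ c = '.' := by
  constructor
  · intro h
    unfold PySem.Chars.lowerChar at h
    by_cases hu : PySem.Chars.isupper c = true
    · exfalso
      rw [if_pos hu] at h
      simp [PySem.Chars.isupper] at hu
      obtain ⟨h1, h2⟩ := hu
      rw [Char.le_def] at h1 h2
      have h1' : (65 : Nat) ≤ c.toNat := by simpa using UInt32.le_iff_toNat_le.mp h1
      have h2' : c.toNat ≤ 90 := by simpa using UInt32.le_iff_toNat_le.mp h2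
      have ht := congrArg Char.toNat h
      rw [Char.toNat_ofNat, if_pos (Or.inl (by omega : c.toNat + 32 < 0xd800))] at ht
      rw [show Char.toNat '.' = 46 from rfl] at ht
      omega
    · rwa [if_neg hu] at h
  · intro h; subst h; decide

theorem pv_lower_cons (c : Char) (l : List Char) :
    PySem.Chars.lower (c :: l) = PySem.Chars.lowerChar c :: PySem.Chars.lower l := by
  simp [PySem.Chars.lower]

theorem pv_dot_mem_lower (l : List Char) (h : '.' ∈ l) : '.' ∈ PySem.Chars.lower l := by
  have he : PySem.Chars.lower l = l.map PySem.Chars.lowerChar := by simp [PySem.Chars.lower]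
  rw [he]
  exact List.mem_map.2 ⟨'.', h, by decide⟩

-- A's value written through the match (the '.'-in guard is redundant: rsplit is none exactly then)
def pvACore (cs : List Char) : Bool :=
  match pvRsplitDot cs with
  | none => false
  | some (base, ext) =>
    if !(PySem.Set.contains (PySem.Set.ofList ["cio".toList]) (PySem.Chars.lower ext)) then false
    else pvHexLoop base

theorem pv_A_eq_core (filename : String) :
    acceptable_filename filename = pvACore filename.toList := by
  unfold acceptable_filename pvACore
  cases h : pvRsplitDot filename.toList with
  | none =>
    have hn : '.' ∉ filename.toList := (pv_rsplit_none_iff _).1 h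
    simp [pv_isIn_singleton, hn]
  | some p =>
    obtain ⟨b, e⟩ := p
    have hmem : '.' ∈ filename.toList := by
      by_contra hn
      rw [(pv_rsplit_none_iff _).2 hn] at h; cases h
    simp [pv_isIn_singleton, hmem, h]

theorem pv_core_eq_alt (cs : List Char) :
    pvACore cs = (PySem.Chars.lower (cs.dropWhile pvHexClass) == ['.', 'c', 'i', 'o']) := by
  induction cs with
  | nil => simp [pvACore, pvRsplitDot, PySem.Chars.lower]
  | cons c rest ih =>
    by_cases hc : pvHexClass c = true
    · -- c is in the hex class: dropWhile passes it; it cannot be '.'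
      have hcd : c ≠ '.' := by
        intro h; subst h; exact absurd hc (by decide)
      rw [List.dropWhile_cons_of_pos hc, ← ih]
      unfold pvACore
      cases h : pvRsplitDot rest with
      | some p =>
        obtain ⟨b, e⟩ := p
        simp only [pvRsplitDot, h]
        simp only [pvHexLoop, pv_hex_eq_class, hc]
        simp
      | none =>
        simp only [pvRsplitDot, h]
        simp [hcd]
    · rw [Bool.not_eq_true] at hc
      rw [List.dropWhile_cons_of_neg (by simp [hc]), pv_lower_cons]
      by_cases hdot : c = '.'
      · subst hdot
        unfold pvACore
        cases h : pvRsplitDot rest with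
        | some p =>
          obtain ⟨b, e⟩ := p
          have hmem : '.' ∈ rest := by
            by_contra hn
            rw [(pv_rsplit_none_iff _).2 hn] at h; cases h
          have hml : '.' ∈ PySem.Chars.lower rest := pv_dot_mem_lower _ hmem
          have hne : ¬ (PySem.Chars.lower rest = ['c', 'i', 'o']) := by
            intro he; rw [he] at hml; simp at hml
          simp only [pvRsplitDot, h]
          simp only [pvHexLoop, pv_hex_eq_class]
          simp [hne, show pvHexClass '.' = false from by decide,
                show PySem.Chars.lowerChar '.' = '.' from by decide]
        | none =>
          simp only [pvRsplitDot, h]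
          simp [pvHexLoop, show PySem.Chars.lowerChar '.' = '.' from by decide]
          rw [Bool.eq_iff_iff]
          simp
      · -- first unmatched char is not '.': both sides are false
        have hlne : PySem.Chars.lowerChar c ≠ '.' := fun h => hdot ((pv_lowerChar_dot c).1 h)
        unfold pvACore
        cases h : pvRsplitDot rest with
        | some p =>
          obtain ⟨b, e⟩ := p
          simp only [pvRsplitDot, h]
          simp only [pvHexLoop, pv_hex_eq_class, hc]
          simp [hlne]
        | none =>
          simp only [pvRsplitDot, h]
          simp [hdot, hlne]

-- ===== VERDICT (by name: the statement is the Claim_ definition above) =====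
theorem acceptable_filename_spec : Claim_equal_acceptable_filename := by
  intro filename _
  unfold Spec_acceptable_filename acceptable_filename_alt
  rw [pv_A_eq_core, pv_core_eq_alt]
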